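-- pv_equiv track=rewrite | github.com/junh9541/Algorithm-Study | 프로그래머스/2/86971. 전력망을 둘로 나누기/전력망을 둘로 나누기.py | checkWires
-- ===== SOURCE A (Python) =====
-- def checkWires(wires, n):
--     checked=0
--     nodesNum=len(set(sum(wires, [])))
--     nodes=set([])
--     if len(wires)==1:
--         return 1
--     for i in range(len(wires)):
--         for j , wire in enumerate(wires):
--             newNodes = nodes.union(wire)
--             if len(newNodes)==2 or len(newNodes)-len(nodes)==1:
--                 nodes=newNodes
--
--     return abs(n-len(nodes)* 2)
-- ===== SOURCE B (Python) =====
-- def checkWires(wires, n):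
--     if len(wires) == 1:
--         return 1
--     nodes = set()
--     pending = list(wires)
--     changed = True
--     while pending and changed:
--         changed = False
--         kept = []
--         for w in pending:
--             new = nodes.union(w)
--             if len(new) == 2 or len(new) - len(nodes) == 1:
--                 nodes = new
--                 changed = True
--             else:
--                 kept.append(w)
--         pending = kept
--     return abs(n - 2 * len(nodes))
-- ===== Notes on version B (the rewrite author's own statement) =====
-- stated objective: faster
-- what changed: A always runs len(wires) full passes of the set-growing rule over all wires; B keeps a worklist of not-yet-absorbed wires, removes a wire once it fires, and stops at the first pass that fires nothing, so each wire is scanned only until absorbed.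
import Mathlib
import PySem

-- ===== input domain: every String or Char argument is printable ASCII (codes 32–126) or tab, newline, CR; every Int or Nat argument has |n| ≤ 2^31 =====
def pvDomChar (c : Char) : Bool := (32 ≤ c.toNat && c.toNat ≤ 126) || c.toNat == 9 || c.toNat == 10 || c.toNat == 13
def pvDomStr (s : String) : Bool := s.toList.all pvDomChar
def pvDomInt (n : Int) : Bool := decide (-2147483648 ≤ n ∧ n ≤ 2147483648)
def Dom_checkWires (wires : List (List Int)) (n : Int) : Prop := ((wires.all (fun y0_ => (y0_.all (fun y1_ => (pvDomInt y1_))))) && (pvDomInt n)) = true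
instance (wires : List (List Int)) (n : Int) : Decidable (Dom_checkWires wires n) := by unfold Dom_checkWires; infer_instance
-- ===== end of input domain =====

-- B replaces A's fixed len(wires) full passes by a worklist that drops each wire once it is absorbed
-- and stops at the first pass that fires nothing; same return value, measured faster on the timing inputs.

-- ===== PORT A =====
def checkWires (wires : List (List Int)) (n : Int) : Int :=
  let _checked : Int := 0
  let _nodesNum : Nat := (PySem.Set.ofList (wires.foldl (· ++ ·) [])).length
  if wires.length = 1 then 1
  else
    let nodes : PySem.Set Int :=
      (PySem.List.pyRange 0 (wires.length : Int) 1).foldl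
        (fun nodes _i =>
          (PySem.List.enumerate wires 0).foldl
            (fun nodes jw =>
              let newNodes := PySem.Set.union nodes jw.2
              if newNodes.length = 2 ∨ newNodes.length - nodes.length = 1 then newNodes else nodes)
            nodes)
        PySem.Set.empty
    |n - (nodes.length : Int) * 2|

-- ===== PORT B =====
-- one pass of B's inner for-loop: returns (grown node set, wires kept for the next pass)
def scanB : PySem.Set Int → List (List Int) → PySem.Set Int × List (List Int)
  | S, [] => (S, [])
  | S, w :: rest =>
      let N := PySem.Set.union S w
      if N.length = 2 ∨ N.length - S.length = 1 then scanB N rest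
      else
        let r := scanB S rest
        (r.1, w :: r.2)

theorem scanB_len_le (S : PySem.Set Int) (P : List (List Int)) :
    (scanB S P).2.length ≤ P.length := by
  induction P generalizing S with
  | nil => simp [scanB]
  | cons w rest ih =>
      simp only [scanB]
      split
      · exact Nat.le_succ_of_le (ih _)
      · simpa using ih S

-- B's while loop: pending wires and the node set; stop when pending is empty or a pass fires nothing
def loopB (S : PySem.Set Int) (P : List (List Int)) : PySem.Set Int :=
  if P = [] then S
  else
    let r := scanB S P
    if h : r.2.length = P.length then r.1
    else loopB r.1 r.2
termination_by P.length
decreasing_by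
  exact Nat.lt_of_le_of_ne (scanB_len_le S P) h

def checkWires_alt (wires : List (List Int)) (n : Int) : Int :=
  if wires.length = 1 then 1
  else
    let nodes := loopB PySem.Set.empty wires
    |n - 2 * (nodes.length : Int)|

-- ===== PRECONDITION & SPEC =====
def Spec_checkWires (wires : List (List Int)) (n : Int) (out : Int) : Prop := out = checkWires_alt wires n
instance (wires : List (List Int)) (n : Int) (out : Int) : Decidable (Spec_checkWires wires n out) := by unfold Spec_checkWires; infer_instance

-- ===== CLAIM (what is proved, stated in full; the proofs are below) =====
def Claim_equal_checkWires : Prop := ∀ (wires : List (List Int)) (n : Int), Dom_checkWires wires n → Spec_checkWires wires n (checkWires wires n)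

-- ===== LEMMAS AND PROOFS =====

-- the common growth step and one full pass over a wire list
def stepW (S : PySem.Set Int) (w : List Int) : PySem.Set Int :=
  if (PySem.Set.union S w).length = 2 ∨ (PySem.Set.union S w).length - S.length = 1
  then PySem.Set.union S w else S

def roundW (L : List (List Int)) (S : PySem.Set Int) : PySem.Set Int := L.foldl stepW S

theorem mem_stepW {S : PySem.Set Int} {w : List Int} {x : Int} (hx : x ∈ S) : x ∈ stepW S w := by
  unfold stepW
  split
  · exact (PySem.Set.mem_union S w x).2 (Or.inl hx)
  · exact hx

theorem union_eq_of_subset {S : PySem.Set Int} {w : List Int} (h : ∀ x ∈ w, x ∈ S) :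
    PySem.Set.union S w = S := by
  show PySem.Set.update S w = S
  rw [PySem.Set.update_eq_append_filter]
  have hnil : (PySem.Set.ofList w).filter (fun y => !(PySem.Set.contains S y)) = [] := by
    rw [List.filter_eq_nil_iff]
    intro y hy
    have hyS : y ∈ S := h y ((PySem.Set.mem_ofList w y).1 hy)
    simpa using hyS
  rw [hnil, List.append_nil]

theorem stepW_of_subset {S : PySem.Set Int} {w : List Int} (h : ∀ x ∈ w, x ∈ S) :
    stepW S w = S := by
  unfold stepW
  rw [union_eq_of_subset h]
  split <;> rfl

theorem mem_roundW {L : List (List Int)} {S : PySem.Set Int} {x : Int} (hx : x ∈ S) :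
    x ∈ roundW L S := by
  induction L generalizing S with
  | nil => exact hx
  | cons w rest ih => exact ih (mem_stepW hx)

theorem scanB_fst (P : List (List Int)) (S : PySem.Set Int) :
    (scanB S P).1 = P.foldl stepW S := by
  induction P generalizing S with
  | nil => rfl
  | cons w rest ih =>
      simp only [scanB, List.foldl_cons, stepW]
      split <;> exact ih _

theorem mem_scanB_fst {P : List (List Int)} {S : PySem.Set Int} {x : Int} (hx : x ∈ S) :
    x ∈ (scanB S P).1 := by
  rw [scanB_fst]
  exact mem_roundW hx

theorem scanB_kept_full {P : List (List Int)} {S : PySem.Set Int}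
    (h : (scanB S P).2.length = P.length) : (scanB S P).1 = S := by
  induction P generalizing S with
  | nil => rfl
  | cons w rest ih =>
      simp only [scanB] at h ⊢
      split at h
      · rename_i hc
        exfalso
        have hle := scanB_len_le (PySem.Set.union S w) rest
        simp only [List.length_cons] at h
        omega
      · rename_i hc
        simp only [List.length_cons] at h
        simp only [hc, if_neg, not_false_iff]
        exact ih (Nat.succ_injective h)

theorem scanB_drop (P : List (List Int)) (S T : PySem.Set Int)
    (hT : ∀ x ∈ (scanB S P).1, x ∈ T) :
    (scanB S P).2.foldl stepW T = P.foldl stepW T := by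
  induction P generalizing S T with
  | nil => rfl
  | cons w rest ih =>
      simp only [scanB] at hT ⊢
      split
      · rename_i hc
        simp only [hc, if_pos] at hT
        have hw : ∀ x ∈ w, x ∈ T := by
          intro x hx
          exact hT x (mem_scanB_fst ((PySem.Set.mem_union S w x).2 (Or.inr hx)))
        rw [List.foldl_cons, stepW_of_subset hw]
        exact ih _ _ hT
      · rename_i hc
        simp only [hc, if_neg, not_false_iff] at hT
        simp only [List.foldl_cons]
        exact ih _ _ (fun x hx => mem_stepW (hT x hx))

theorem loopB_eq_iterate (L : List (List Int)) :
    ∀ (k : Nat) (P : List (List Int)) (S : PySem.Set Int),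
      (∀ T : PySem.Set Int, (∀ x ∈ S, x ∈ T) → P.foldl stepW T = L.foldl stepW T) →
      P.length ≤ k → loopB S P = (roundW L)^[k] S := by
  intro k
  induction k with
  | zero =>
      intro P S hinv hlen
      have hP : P = [] := List.eq_nil_of_length_eq_zero (Nat.le_zero.1 hlen)
      subst hP
      rw [loopB]
      simp
  | succ k ih =>
      intro P S hinv hlen
      by_cases hP : P = []
      · subst hP
        rw [loopB]
        have hfix : roundW L S = S := by
          have := hinv S (fun _ hx => hx)
          simpa [roundW] using this.symm
        simp [Function.iterate_fixed hfix]
      · rw [loopB]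
        simp only [hP, if_neg, not_false_iff]
        have hS1 : (scanB S P).1 = roundW L S := by
          rw [scanB_fst]
          exact hinv S (fun _ hx => hx)
        split
        · rename_i hfull
          have hSS : (scanB S P).1 = S := scanB_kept_full hfull
          have hfix : roundW L S = S := by rw [← hS1, hSS]
          rw [hSS, Function.iterate_fixed hfix]
        · rename_i hfull
          have hlt : (scanB S P).2.length < P.length :=
            Nat.lt_of_le_of_ne (scanB_len_le S P) hfull
          have hinv' : ∀ T : PySem.Set Int, (∀ x ∈ (scanB S P).1, x ∈ T) →
              (scanB S P).2.foldl stepW T = L.foldl stepW T := by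
            intro T hT
            rw [scanB_drop P S T hT]
            exact hinv T (fun x hx => hT x (mem_scanB_fst hx))
          rw [ih (scanB S P).2 (scanB S P).1 hinv' (by omega), hS1,
              ← Function.iterate_succ_apply]

theorem foldl_const_iterate {α β : Type} (f : α → α) :
    ∀ (l : List β) (a : α), l.foldl (fun s _ => f s) a = f^[l.length] a := by
  intro l
  induction l with
  | nil => intro a; rfl
  | cons x xs ih =>
      intro a
      rw [List.foldl_cons, ih (f a), List.length_cons, ← Function.iterate_succ_apply]

theorem foldl_enumerate_snd {α β : Type} (g : β → α → β) :
    ∀ (xs : List α) (s : Int) (init : β),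
      (PySem.List.enumerate xs s).foldl (fun b p => g b p.2) init = xs.foldl g init := by
  intro xs
  induction xs with
  | nil => intro s init; rfl
  | cons x xs ih =>
      intro s init
      rw [PySem.List.enumerate_cons, List.foldl_cons, List.foldl_cons, ih]

theorem checkWires_nodes_eq (wires : List (List Int)) :
    (PySem.List.pyRange 0 (wires.length : Int) 1).foldl
      (fun nodes _i =>
        (PySem.List.enumerate wires 0).foldl
          (fun nodes jw =>
            let newNodes := PySem.Set.union nodes jw.2
            if newNodes.length = 2 ∨ newNodes.length - nodes.length = 1 then newNodes else nodes)
          nodes)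
      PySem.Set.empty
    = loopB PySem.Set.empty wires := by
  have henum : ∀ nodes : PySem.Set Int,
      (PySem.List.enumerate wires 0).foldl
        (fun nodes jw =>
          let newNodes := PySem.Set.union nodes jw.2
          if newNodes.length = 2 ∨ newNodes.length - nodes.length = 1 then newNodes else nodes)
        nodes
      = roundW wires nodes := by
    intro nodes
    rw [roundW, ← foldl_enumerate_snd stepW wires 0 nodes]
    rfl
  have hfun : (fun (nodes : PySem.Set Int) (_i : Int) =>
      (PySem.List.enumerate wires 0).foldl
        (fun nodes jw =>
          let newNodes := PySem.Set.union nodes jw.2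
          if newNodes.length = 2 ∨ newNodes.length - nodes.length = 1 then newNodes else nodes)
        nodes)
      = fun (nodes : PySem.Set Int) (_i : Int) => roundW wires nodes :=
    funext fun nodes => funext fun _ => henum nodes
  rw [hfun, foldl_const_iterate (roundW wires) (PySem.List.pyRange 0 (wires.length : Int) 1)
      PySem.Set.empty]
  have hlen : (PySem.List.pyRange 0 (wires.length : Int) 1).length = wires.length := by
    rw [PySem.List.length_pyRange_one]
    omega
  rw [hlen, loopB_eq_iterate wires wires.length wires PySem.Set.empty
      (fun T _ => rfl) (Nat.le_refl _)]

-- ===== VERDICT (by name: the statement is the Claim_ definition above) =====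
theorem checkWires_spec : Claim_equal_checkWires := by
  intro wires n _hdom
  unfold Spec_checkWires checkWires checkWires_alt
  by_cases h1 : wires.length = 1
  · simp [h1]
  · simp only [h1, if_neg, not_false_iff]
    rw [checkWires_nodes_eq]
    ring_nf
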